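-- pv_equiv track=rewrite | github.com/dominicbethz/Parametric-LCA-Urban-Densification | Functions/general_helper.py | get_closest_interval
-- ===== SOURCE A (Python) =====
-- def get_closest_interval(value, intervals, prefer='lower'):
--     """
--     Functinon to get the nearest interval: to identify the GWP_bio_factors.
--     It takes always the lower one: e.g. if interval 10, 20 and value=15 -> it takes 10
--     """
--     distances = [abs(x - value) for x in intervals]
--     min_distance = min(distances)
--     closest_intervals = [x for x, d in zip(intervals, distances) if d == min_distance]
--
--     if len(closest_intervals) > 1:
--         if prefer == 'lower':
--             return min(closest_intervals)
--         elif prefer == 'higher':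
--             return max(closest_intervals)
--     else:
--         return closest_intervals[0]
-- ===== SOURCE B (Python) =====
-- def get_closest_interval(value, intervals, prefer='lower'):
--     # single pass collecting every element at the smallest distance seen so far
--     best_d = None
--     closest = []
--     for x in intervals:
--         d = abs(x - value)
--         if best_d is None or d < best_d:
--             best_d, closest = d, [x]
--         elif d == best_d:
--             closest.append(x)
--     if len(closest) > 1:
--         if prefer == 'lower':
--             return min(closest)
--         if prefer == 'higher':
--             return max(closest)
--     else:
--         return closest[0]
-- ===== Notes on version B (the rewrite author's own statement) =====
-- stated objective: faster
-- what changed: Replaces A's four passes (distance list, min of it, zip-and-filter for the closest list) by one left-to-right pass that maintains the best distance and the running list of elements achieving it; Pre_ excludes the empty list (A raises ValueError) and ties with a prefer other than 'lower'/'higher' (both programs return None, not an int).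
-- outside the precondition, e.g. on get_closest_interval(0, [1, -1], 'x'): A returns None, B returns None
import Mathlib
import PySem

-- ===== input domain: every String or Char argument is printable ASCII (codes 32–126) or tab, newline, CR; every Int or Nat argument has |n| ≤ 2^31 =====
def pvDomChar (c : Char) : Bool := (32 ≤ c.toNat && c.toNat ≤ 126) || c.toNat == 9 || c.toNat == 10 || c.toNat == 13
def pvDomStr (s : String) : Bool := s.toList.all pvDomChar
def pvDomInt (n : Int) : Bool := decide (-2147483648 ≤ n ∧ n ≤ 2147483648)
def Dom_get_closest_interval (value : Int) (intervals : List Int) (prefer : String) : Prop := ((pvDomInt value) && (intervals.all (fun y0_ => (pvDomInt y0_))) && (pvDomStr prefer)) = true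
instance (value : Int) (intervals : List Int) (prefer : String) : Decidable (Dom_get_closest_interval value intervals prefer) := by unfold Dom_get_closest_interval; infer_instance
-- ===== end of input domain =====

-- B replaces A's four passes (distances, min, zip-and-filter) by a single pass that
-- collects the elements at the smallest distance seen so far; same O(n) cost.


-- ===== PORT A =====
def get_closest_interval (value : Int) (intervals : List Int) (prefer : String) : Int :=
  let distances := intervals.map (fun x => |x - value|)
  match PySem.List.min? distances (fun d => d) with
  | none => 0  -- Python raises ValueError here (empty intervals); excluded by Pre_
  | some min_distance =>
    let closest_intervals := ((intervals.zip distances).filter (fun p => p.2 == min_distance)).map (fun p => p.1)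
    if closest_intervals.length > 1 then
      if prefer == "lower" then (PySem.List.min? closest_intervals (fun x => x)).getD 0
      else if prefer == "higher" then (PySem.List.max? closest_intervals (fun x => x)).getD 0
      else 0  -- Python returns None here (not an int); excluded by Pre_
    else (PySem.List.pyGet? closest_intervals 0).getD 0

-- ===== PORT B =====
-- one step of B's loop: state = none before the first element, then (best_d, closest so far)
def altStep (value : Int) (s : Option (Int × List Int)) (x : Int) : Option (Int × List Int) :=
  let d := |x - value|
  match s with
  | none => some (d, [x])
  | some (bd, closest) =>
    if d < bd then some (d, [x])
    else if d = bd then some (bd, closest ++ [x])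
    else some (bd, closest)

def get_closest_interval_alt (value : Int) (intervals : List Int) (prefer : String) : Int :=
  match intervals.foldl (altStep value) none with
  | none => 0  -- Python raises IndexError here (empty intervals); excluded by Pre_
  | some (_, closest) =>
    if closest.length > 1 then
      if prefer == "lower" then (PySem.List.min? closest (fun x => x)).getD 0
      else if prefer == "higher" then (PySem.List.max? closest (fun x => x)).getD 0
      else 0  -- Python returns None here (not an int); excluded by Pre_
    else (PySem.List.pyGet? closest 0).getD 0

-- ===== PRECONDITION & SPEC =====
-- Pre_ excludes the empty list, on which A raises ValueError (min of an empty sequence), and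
-- inputs where more than one element is closest while prefer is neither 'lower' nor 'higher',
-- on which both programs return None rather than an int.
def Pre_get_closest_interval (value : Int) (intervals : List Int) (prefer : String) : Prop :=
  intervals ≠ [] ∧
    (prefer = "lower" ∨ prefer = "higher" ∨
      intervals.countP (fun x => decide (∀ y ∈ intervals, |x - value| ≤ |y - value|)) ≤ 1)
instance (value : Int) (intervals : List Int) (prefer : String) : Decidable (Pre_get_closest_interval value intervals prefer) := by unfold Pre_get_closest_interval; infer_instance

def pvWitness_get_closest_interval : Int × List Int × String := (15, [10, 20, 40], "lower")

def Spec_get_closest_interval (value : Int) (intervals : List Int) (prefer : String) (out : Int) : Prop := out = get_closest_interval_alt value intervals prefer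
instance (value : Int) (intervals : List Int) (prefer : String) (out : Int) : Decidable (Spec_get_closest_interval value intervals prefer out) := by unfold Spec_get_closest_interval; infer_instance

-- ===== CLAIM (what is proved, stated in full; the proofs are below) =====
def Claim_equal_get_closest_interval : Prop := ∀ (value : Int) (intervals : List Int) (prefer : String), Dom_get_closest_interval value intervals prefer → Pre_get_closest_interval value intervals prefer → Spec_get_closest_interval value intervals prefer (get_closest_interval value intervals prefer)

-- ===== LEMMAS AND PROOFS =====

-- A's zip-with-distances filter is a plain filter on the elements
theorem zip_map_filter_eq (f : Int → Int) (m : Int) (l : List Int) :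
    (((l.zip (l.map f)).filter (fun p => p.2 == m)).map (fun p => p.1))
      = l.filter (fun x => f x == m) := by
  induction l with
  | nil => rfl
  | cons a t ih =>
    by_cases h : f a == m <;> simp [List.filter, h, ih]

-- invariant of B's fold: after a nonempty prefix l the state is the minimum distance m
-- together with the sublist of elements at distance m, in order
theorem altFold_inv (value : Int) (l : List Int) (hl : l ≠ []) :
    ∃ m, l.foldl (altStep value) none = some (m, l.filter (fun x => |x - value| == m)) ∧
      (∀ y ∈ l, m ≤ |y - value|) ∧ (∃ x ∈ l, |x - value| = m) := by
  induction l using List.reverseRecOn with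
  | nil => exact absurd rfl hl
  | append_singleton t y ih =>
    rcases eq_or_ne t [] with rfl | ht
    · exact ⟨|y - value|, by simp [altStep], by simp, by simp⟩
    · obtain ⟨m, hfold, hmin, x, hx_mem, hx_d⟩ := ih ht
      have hfold' : (t ++ [y]).foldl (altStep value) none
          = altStep value (t.foldl (altStep value) none) y := by
        simp [List.foldl_append]
      rcases lt_trichotomy (|y - value|) m with hcmp | hcmp | hcmp
      · refine ⟨|y - value|, ?_, ?_, ?_⟩
        · rw [hfold', hfold]
          simp only [altStep]
          rw [if_pos hcmp]
          have hfilter : ∀ z ∈ t, ¬ (|z - value| == |y - value|) = true := by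
            intro z hz hzeq
            have := hmin z hz
            simp only [beq_iff_eq] at hzeq
            omega
          have : (t ++ [y]).filter (fun x => |x - value| == |y - value|) = [y] := by
            rw [List.filter_append]
            simp [List.filter_eq_nil_iff.mpr hfilter]
          rw [this]
        · intro z hz
          rcases List.mem_append.mp hz with hz | hz
          · have := hmin z hz; omega
          · simp at hz; subst hz; omega
        · exact ⟨y, by simp, rfl⟩
      · refine ⟨m, ?_, ?_, ⟨x, List.mem_append.mpr (Or.inl hx_mem), hx_d⟩⟩
        · rw [hfold', hfold]
          have hfilt : (t ++ [y]).filter (fun x => |x - value| == m)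
              = t.filter (fun x => |x - value| == m) ++ [y] := by
            rw [List.filter_append]; simp [hcmp]
          simp only [altStep, hcmp, lt_irrefl, if_false, if_true, hfilt]
        · intro z hz
          rcases List.mem_append.mp hz with hz | hz
          · exact hmin z hz
          · simp at hz; subst hz; omega
      · refine ⟨m, ?_, ?_, ⟨x, List.mem_append.mpr (Or.inl hx_mem), hx_d⟩⟩
        · rw [hfold', hfold]
          simp only [altStep]
          rw [if_neg (by omega), if_neg (by omega)]
          have : (t ++ [y]).filter (fun x => |x - value| == m)
              = t.filter (fun x => |x - value| == m) := by
            rw [List.filter_append]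
            simp only [List.filter_cons, List.filter_nil]
            rw [if_neg (by simp; omega)]
            simp
          rw [this]
        · intro z hz
          rcases List.mem_append.mp hz with hz | hz
          · exact hmin z hz
          · simp at hz; subst hz; omega

-- ===== VERDICT (by name: the statement is the Claim_ definition above) =====
theorem get_closest_interval_spec : Claim_equal_get_closest_interval := by
  intro value intervals prefer _ hpre
  obtain ⟨hne, -⟩ := hpre
  obtain ⟨m, hfold, hmin, x, hx_mem, hx_d⟩ := altFold_inv value intervals hne
  unfold Spec_get_closest_interval get_closest_interval get_closest_interval_alt
  have hmem_d : m ∈ intervals.map (fun x => |x - value|) :=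
    List.mem_map.mpr ⟨x, hx_mem, hx_d⟩
  obtain ⟨d0, hd0⟩ : ∃ d0, PySem.List.min? (intervals.map (fun x => |x - value|)) (fun d => d) = some d0 := by
    cases h : PySem.List.min? (intervals.map (fun x => |x - value|)) (fun d => d) with
    | none => exact absurd ((PySem.List.min?_eq_none_iff _ _).mp h) (by simp [hne])
    | some d0 => exact ⟨d0, rfl⟩
  have hd0m : d0 = m := by
    have h1 := PySem.List.min?_mem hd0
    have h2 := PySem.List.min?_isMin hd0 m hmem_d
    obtain ⟨z, hz, hzd⟩ := List.mem_map.mp h1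
    have := hmin z hz
    omega
  subst hd0m
  simp only [hd0, hfold, zip_map_filter_eq]
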